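-- pv_equiv track=rewrite | github.com/aidenisaman/pyRacerzRevamped | modules/ai_track_model.py | _reachable_component
-- ===== SOURCE A (Python) =====
-- from collections import deque
--
-- def _reachable_component(mask, starts):
--   if not mask or not starts:
--     return set()
--   q = deque([s for s in starts if s in mask])
--   if not q:
--     return set()
--   seen = set(q)
--   while q:
--     cur = q.popleft()
--     for nxt in (
--       (cur[0] + 1, cur[1]),
--       (cur[0] - 1, cur[1]),
--       (cur[0], cur[1] + 1),
--       (cur[0], cur[1] - 1),
--     ):
--       if nxt in mask and nxt not in seen:
--         seen.add(nxt)
--         q.append(nxt)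
--   return seen
-- ===== SOURCE B (Python) =====
-- def _reachable_component(mask, starts):
--   if not mask or not starts:
--     return set()
--   frontier = [s for s in starts if s in mask]
--   if not frontier:
--     return set()
--   seen = set(frontier)
--   while frontier:
--     frontier = {
--       n
--       for c in frontier
--       for n in ((c[0] + 1, c[1]), (c[0] - 1, c[1]), (c[0], c[1] + 1), (c[0], c[1] - 1))
--       if n in mask and n not in seen
--     }
--     seen |= frontier
--   return seen
-- ===== Notes on version B (the rewrite author's own statement) =====
-- stated objective: alternative
-- what changed: Replaces the deque-based cell-at-a-time BFS with a layered fixpoint: each iteration expands the whole frontier with one set comprehension and unions it into seen, so no queue is maintained.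
import Mathlib
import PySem

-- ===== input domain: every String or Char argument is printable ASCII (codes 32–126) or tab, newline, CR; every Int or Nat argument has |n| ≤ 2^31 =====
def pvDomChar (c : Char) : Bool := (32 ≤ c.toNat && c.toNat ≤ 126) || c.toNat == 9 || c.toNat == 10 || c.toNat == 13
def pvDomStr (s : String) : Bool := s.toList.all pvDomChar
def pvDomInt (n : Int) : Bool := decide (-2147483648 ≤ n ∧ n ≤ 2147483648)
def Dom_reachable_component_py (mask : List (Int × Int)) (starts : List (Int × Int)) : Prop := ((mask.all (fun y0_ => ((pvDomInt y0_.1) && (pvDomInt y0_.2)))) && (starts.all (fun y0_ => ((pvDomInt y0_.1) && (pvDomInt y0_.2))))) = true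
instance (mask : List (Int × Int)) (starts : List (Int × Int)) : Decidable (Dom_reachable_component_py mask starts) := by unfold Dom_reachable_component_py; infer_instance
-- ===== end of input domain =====

-- B replaces A's deque-based cell-at-a-time BFS by a layered frontier fixpoint (whole-layer set expansion); alternative decomposition, same return value.

-- ===== PORT A =====
-- the four neighbours of a cell, in A's (and B's) tuple order
def pvNbrs (c : Int × Int) : List (Int × Int) :=
  [(c.1 + 1, c.2), (c.1 - 1, c.2), (c.1, c.2 + 1), (c.1, c.2 - 1)]


-- one iteration of A's inner `for nxt in …` body: state = (seen, cells appended to q during this pop)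
def pvStep (mask : List (Int × Int)) (st : List (Int × Int) × List (Int × Int)) (n : Int × Int) :
    List (Int × Int) × List (Int × Int) :=
  if n ∈ mask ∧ n ∉ st.1 then (st.1 ++ [n], st.2 ++ [n]) else st


-- termination measure: number of distinct mask cells not yet seen
def pvDiff (mask s : List (Int × Int)) : Nat := (mask.toFinset \ s.toFinset).card


-- invariant of the inner fold (cited by bfsA's decreasing_by and by the proofs below)
theorem pvFold_inv (mask : List (Int × Int)) (ns : List (Int × Int)) : ∀ (s a : List (Int × Int)),
    (ns.foldl (pvStep mask) (s ++ a, a)).1 = s ++ (ns.foldl (pvStep mask) (s ++ a, a)).2 ∧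
    ∀ x ∈ (ns.foldl (pvStep mask) (s ++ a, a)).2, x ∈ a ∨ (x ∈ mask ∧ x ∉ s) := by
  induction ns with
  | nil => intro s a; exact ⟨rfl, fun x hx => Or.inl hx⟩
  | cons n ns ih =>
    intro s a
    simp only [List.foldl_cons, pvStep]
    by_cases h : n ∈ mask ∧ n ∉ s ++ a
    · rw [if_pos h]
      have := ih s (a ++ [n])
      rw [← List.append_assoc] at this
      refine ⟨this.1, fun x hx => ?_⟩
      rcases this.2 x hx with h1 | h2
      · rcases List.mem_append.1 h1 with h3 | h3
        · exact Or.inl h3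
        · simp only [List.mem_singleton] at h3
          subst h3
          exact Or.inr ⟨h.1, fun hs => h.2 (List.mem_append.2 (Or.inl hs))⟩
      · exact Or.inr h2
    · rw [if_neg h]
      exact ih s a

theorem pvFold_inv0 (mask : List (Int × Int)) (ns : List (Int × Int)) (s : List (Int × Int)) :
    (ns.foldl (pvStep mask) (s, [])).1 = s ++ (ns.foldl (pvStep mask) (s, [])).2 ∧
    ∀ x ∈ (ns.foldl (pvStep mask) (s, [])).2, x ∈ mask ∧ x ∉ s := by
  have := pvFold_inv mask ns s []
  simp only [List.append_nil] at this
  exact ⟨this.1, fun x hx => (this.2 x hx).resolve_left (by simp)⟩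

theorem pvDiff_lt (mask s u : List (Int × Int)) (hsub : ∀ y ∈ s, y ∈ u) (x : Int × Int)
    (hxm : x ∈ mask) (hxs : x ∉ s) (hxu : x ∈ u) : pvDiff mask u < pvDiff mask s := by
  apply Finset.card_lt_card
  rw [Finset.ssubset_iff_of_subset]
  · exact ⟨x, by simp [hxm, hxs], by simp [hxu]⟩
  · intro y hy
    simp only [Finset.mem_sdiff, List.mem_toFinset] at hy ⊢
    exact ⟨hy.1, fun hu => hy.2 (hsub y hu)⟩


-- A's while-loop: queue processed from the left, newly seen cells appended to the right
def bfsA (mask : List (Int × Int)) : List (Int × Int) → List (Int × Int) → List (Int × Int)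
  | [], seen => seen
  | c :: rest, seen =>
      bfsA mask (rest ++ ((pvNbrs c).foldl (pvStep mask) (seen, [])).2)
        ((pvNbrs c).foldl (pvStep mask) (seen, [])).1
termination_by q seen => (pvDiff mask seen, q.length)
decreasing_by
  obtain ⟨h1, h2⟩ := pvFold_inv0 mask (pvNbrs c) seen
  by_cases hP : ((pvNbrs c).foldl (pvStep mask) (seen, [])).2 = []
  · rw [h1, hP, List.append_nil]
    exact Prod.Lex.right _ (by simp)
  · obtain ⟨x, hx⟩ := List.exists_mem_of_ne_nil _ hP
    exact Prod.Lex.left _ _ (h1 ▸ pvDiff_lt mask seen _ (fun y hy => List.mem_append.2 (Or.inl hy)) x (h2 x hx).1 (h2 x hx).2 (List.mem_append.2 (Or.inr hx)))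


def reachable_component_py (mask : List (Int × Int)) (starts : List (Int × Int)) : List (Int × Int) :=
  if mask = [] ∨ starts = [] then []
  else
    if starts.filter (fun s => decide (s ∈ mask)) = [] then []
    else
      bfsA mask (starts.filter (fun s => decide (s ∈ mask)))
        (PySem.Set.ofList (starts.filter (fun s => decide (s ∈ mask))))

-- ===== PORT B =====
theorem pvMem_union {α : Type} [BEq α] [LawfulBEq α] (t : List α) : ∀ (s : List α) (x : α),
    x ∈ PySem.Set.union s t ↔ x ∈ s ∨ x ∈ t := by
  induction t with
  | nil => intro s x; simp [PySem.Set.union, PySem.Set.update]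
  | cons y t ih =>
    intro s x
    have : PySem.Set.union s (y :: t) = PySem.Set.union (PySem.Set.add s y) t := rfl
    rw [this, ih, PySem.Set.mem_add]
    simp; tauto


-- B's layer comprehension: {n for c in f for n in nbrs(c) if n in mask and n not in seen}
def pvLayerSet (mask seen f : List (Int × Int)) : List (Int × Int) :=
  PySem.Set.ofList ((f.flatMap pvNbrs).filter (fun x => decide (x ∈ mask) && !decide (x ∈ seen)))


-- B's `while frontier:` loop: one whole layer per iteration
def bfsB (mask : List (Int × Int)) (f : List (Int × Int)) (seen : List (Int × Int)) : List (Int × Int) :=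
  if f = [] then seen
  else bfsB mask (pvLayerSet mask seen f) (PySem.Set.union seen (pvLayerSet mask seen f))
termination_by pvDiff mask seen + (if f = [] then 0 else 1)
decreasing_by
  rename_i hf
  by_cases h0 : pvLayerSet mask seen f = []
  · have hu : PySem.Set.union seen ([] : List (Int × Int)) = seen := rfl
    simp [h0, hf, hu]
  · obtain ⟨x, hx⟩ := List.exists_mem_of_ne_nil _ h0
    have hx' : x ∈ mask ∧ x ∉ seen := by
      have := (PySem.Set.mem_ofList _ _).1 hx
      simp only [List.mem_filter, Bool.and_eq_true, decide_eq_true_eq, Bool.not_eq_eq_eq_not, Bool.not_true, decide_eq_false_iff_not] at this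
      exact ⟨this.2.1, this.2.2⟩
    have hlt : pvDiff mask (PySem.Set.union seen (pvLayerSet mask seen f)) < pvDiff mask seen := by
      apply pvDiff_lt mask seen _ (fun y hy => (pvMem_union _ seen y).2 (Or.inl hy)) x hx'.1 hx'.2
      exact (pvMem_union _ seen x).2 (Or.inr hx)
    have hind : (if f = [] then 0 else 1) = 1 := by simp [hf]
    have hc : (if pvLayerSet mask seen f = [] then 0 else 1) ≤ 1 := by split <;> omega
    omega


def reachable_component_py_alt (mask : List (Int × Int)) (starts : List (Int × Int)) : List (Int × Int) :=
  if mask = [] ∨ starts = [] then []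
  else
    if starts.filter (fun s => decide (s ∈ mask)) = [] then []
    else
      bfsB mask (starts.filter (fun s => decide (s ∈ mask)))
        (PySem.Set.ofList (starts.filter (fun s => decide (s ∈ mask))))

-- ===== PRECONDITION & SPEC =====
def Spec_reachable_component_py (mask : List (Int × Int)) (starts : List (Int × Int)) (out : List (Int × Int)) : Prop := out = reachable_component_py_alt mask starts
instance (mask : List (Int × Int)) (starts : List (Int × Int)) (out : List (Int × Int)) : Decidable (Spec_reachable_component_py mask starts out) := by unfold Spec_reachable_component_py; infer_instance

-- ===== CLAIM (what is proved, stated in full; the proofs are below) =====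
def Claim_equal_reachable_component_py : Prop := ∀ (mask : List (Int × Int)) (starts : List (Int × Int)), Dom_reachable_component_py mask starts → Spec_reachable_component_py mask starts (reachable_component_py mask starts)

-- ===== LEMMAS AND PROOFS =====
-- the accumulator of the inner fold only shifts the .2 component
theorem pvFold_shift (mask : List (Int × Int)) (ns : List (Int × Int)) : ∀ (s a : List (Int × Int)),
    ns.foldl (pvStep mask) (s, a) =
      ((ns.foldl (pvStep mask) (s, [])).1, a ++ (ns.foldl (pvStep mask) (s, [])).2) := by
  induction ns with
  | nil => intro s a; simp
  | cons n ns ih =>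
    intro s a
    simp only [List.foldl_cons, pvStep]
    by_cases h : n ∈ mask ∧ n ∉ s
    · rw [if_pos h, if_pos h]
      rw [List.nil_append, ih (s ++ [n]) (a ++ [n]), ih (s ++ [n]) [n]]
      simp
    · rw [if_neg h, if_neg h]
      exact ih s a


-- A's dynamic-seen fold collects exactly the first occurrences of the statically filtered stream
theorem pvFold_set (mask : List (Int × Int)) (ns : List (Int × Int)) : ∀ (s a : List (Int × Int)),
    (ns.foldl (pvStep mask) (s ++ a, a)).2 =
      ns.foldl (fun t x => if x ∈ mask ∧ x ∉ s then PySem.Set.add t x else t) a := by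
  induction ns with
  | nil => intro s a; rfl
  | cons n ns ih =>
    intro s a
    simp only [List.foldl_cons, pvStep]
    by_cases h1 : n ∈ mask ∧ n ∉ s
    · rw [if_pos h1]
      by_cases h2 : n ∈ a
      · have : ¬(n ∈ mask ∧ n ∉ s ++ a) := by
          intro hc; exact hc.2 (List.mem_append.2 (Or.inr h2))
        rw [if_neg this]
        have ha : PySem.Set.add a n = a := by
          simp [PySem.Set.add, PySem.Set.contains, h2]
        rw [ha]
        exact ih s a
      · have : n ∈ mask ∧ n ∉ s ++ a := by
          refine ⟨h1.1, fun hc => ?_⟩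
          rcases List.mem_append.1 hc with h | h
          · exact h1.2 h
          · exact h2 h
        rw [if_pos this]
        have ha : PySem.Set.add a n = a ++ [n] := by
          simp [PySem.Set.add, PySem.Set.contains, h2]
        rw [ha]
        have := ih s (a ++ [n])
        rw [← List.append_assoc] at this
        exact this
    · have : ¬(n ∈ mask ∧ n ∉ s ++ a) := by
        intro hc
        exact h1 ⟨hc.1, fun hs => hc.2 (List.mem_append.2 (Or.inl hs))⟩
      rw [if_neg this, if_neg h1]
      exact ih s a

theorem pvFold_set0 (mask : List (Int × Int)) (f : List (Int × Int)) (s : List (Int × Int)) :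
    ((f.flatMap pvNbrs).foldl (pvStep mask) (s, [])).2 = pvLayerSet mask s f := by
  have h := pvFold_set mask (f.flatMap pvNbrs) s []
  rw [List.append_nil] at h
  rw [h, pvLayerSet, PySem.Set.ofList_eq_foldl, List.foldl_filter]
  congr 1
  funext t x
  by_cases hm : x ∈ mask <;> by_cases hs : x ∈ s <;> simp [hm, hs]


-- union of a set with a disjoint nodup list is concatenation
theorem pvUnion_append {α : Type} [BEq α] [LawfulBEq α] (n : List α) : ∀ (s : List α),
    (∀ x ∈ n, x ∉ s) → n.Nodup → PySem.Set.union s n = s ++ n := by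
  induction n with
  | nil => intro s _ _; simp [PySem.Set.union, PySem.Set.update]
  | cons y n ih =>
    intro s hd hn
    have h1 : PySem.Set.union s (y :: n) = PySem.Set.union (PySem.Set.add s y) n := rfl
    have h2 : PySem.Set.add s y = s ++ [y] := by
      simp [PySem.Set.add, PySem.Set.contains, hd y (by simp)]
    rw [h1, h2, ih (s ++ [y]) ?_ (List.nodup_cons.1 hn).2]
    · simp
    · intro x hx
      simp only [List.mem_append, List.mem_singleton]
      rintro (h | h)
      · exact hd x (by simp [hx]) h
      · exact (List.nodup_cons.1 hn).1 (h ▸ hx)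


-- layering lemma: processing a whole queue prefix = one batched expansion
theorem pvLayer (mask : List (Int × Int)) (f : List (Int × Int)) : ∀ (a s : List (Int × Int)),
    bfsA mask (f ++ a) s =
      bfsA mask (a ++ ((f.flatMap pvNbrs).foldl (pvStep mask) (s, [])).2)
        ((f.flatMap pvNbrs).foldl (pvStep mask) (s, [])).1 := by
  induction f with
  | nil => intro a s; simp
  | cons c f ih =>
    intro a s
    rw [List.cons_append, bfsA]
    rw [List.append_assoc, ih (a ++ ((pvNbrs c).foldl (pvStep mask) (s, [])).2) ((pvNbrs c).foldl (pvStep mask) (s, [])).1]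
    rw [List.flatMap_cons, List.foldl_append]
    have hsh := pvFold_shift mask (f.flatMap pvNbrs) ((pvNbrs c).foldl (pvStep mask) (s, [])).1 ((pvNbrs c).foldl (pvStep mask) (s, [])).2
    rw [show ((pvNbrs c).foldl (pvStep mask) (s, [])) = (((pvNbrs c).foldl (pvStep mask) (s, [])).1, ((pvNbrs c).foldl (pvStep mask) (s, [])).2) from rfl, hsh]
    rw [List.append_assoc]

theorem pvLayerSet_mem (mask s f : List (Int × Int)) (x : Int × Int) (hx : x ∈ pvLayerSet mask s f) :
    x ∈ mask ∧ x ∉ s := by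
  rw [pvLayerSet] at hx
  have := (PySem.Set.mem_ofList _ _).1 hx
  simp only [List.mem_filter, Bool.and_eq_true, decide_eq_true_eq, Bool.not_eq_eq_eq_not,
    Bool.not_true, decide_eq_false_iff_not] at this
  exact ⟨this.2.1, this.2.2⟩


-- main equivalence of the two loops, by induction on the unseen-mask-cells measure
theorem pvMain (mask : List (Int × Int)) : ∀ (k : Nat) (f s : List (Int × Int)),
    pvDiff mask s + (if f = [] then 0 else 1) ≤ k → bfsA mask f s = bfsB mask f s := by
  intro k
  induction k with
  | zero =>
    intro f s h
    cases f with
    | nil => rw [bfsA, bfsB]; simp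
    | cons c rest => simp at h
  | succ k ih =>
    intro f s h
    by_cases hf : f = []
    · subst hf; rw [bfsA, bfsB]; simp
    · have hA : bfsA mask f s = bfsA mask (pvLayerSet mask s f) (s ++ pvLayerSet mask s f) := by
        conv_lhs => rw [← List.append_nil f]
        rw [pvLayer mask f [] s]
        have h1 := (pvFold_inv0 mask (f.flatMap pvNbrs) s).1
        rw [h1, pvFold_set0, List.nil_append]
      have hB : bfsB mask f s = bfsB mask (pvLayerSet mask s f) (s ++ pvLayerSet mask s f) := by
        rw [bfsB, if_neg hf]
        congr 1
        apply pvUnion_append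
        · intro x hx; exact (pvLayerSet_mem mask s f x hx).2
        · rw [pvLayerSet]; exact PySem.Set.nodup_ofList _
      rw [hA, hB]
      apply ih
      by_cases hn : pvLayerSet mask s f = []
      · rw [hn]
        simp only [List.append_nil, if_true]
        have : (if f = [] then 0 else 1) = 1 := by simp [hf]
        omega
      · have hx := List.exists_mem_of_ne_nil _ hn
        obtain ⟨x, hxm⟩ := hx
        have hlt : pvDiff mask (s ++ pvLayerSet mask s f) < pvDiff mask s :=
          pvDiff_lt mask s _ (fun y hy => List.mem_append.2 (Or.inl hy)) x
            (pvLayerSet_mem mask s f x hxm).1 (pvLayerSet_mem mask s f x hxm).2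
            (List.mem_append.2 (Or.inr hxm))
        have h1 : (if f = [] then 0 else 1) = 1 := by simp [hf]
        have h2 : (if pvLayerSet mask s f = [] then 0 else 1) ≤ 1 := by split <;> omega
        omega

-- ===== VERDICT (by name: the statement is the Claim_ definition above) =====
theorem reachable_component_py_spec : Claim_equal_reachable_component_py := by
  intro mask starts _
  unfold Spec_reachable_component_py reachable_component_py reachable_component_py_alt
  split_ifs with h1 h2
  · rfl
  · rfl
  · exact pvMain mask _ _ _ le_rfl
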